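-- pv_equiv track=rewrite | github.com/LivKandlaker/practice-scripts-in-python | Q4_six_simple_function.py | upper_or_lower
-- ===== SOURCE A (Python) =====
-- def upper_or_lower(string):
--     """
--     The Functin get string of Upper and Lower letters and return 2 string seperatly for Upper and Lower
--     :param string:
--     :return: 2 string, 1 for Upper letters, 1 for Lower letters
--     """
--     string_Upper = "" #Create empty list for the upper letters
--     string_Lower = "" #Create empty list for the lower letters
--
--     for i in range(len(string)):
--         if string[i].isupper(): #Check if the letter is Upper
--             string_Upper = string_Upper + string[i] #Add to the Upper string
--         elif string[i].islower(): #Check if the letter is Lower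
--             string_Lower = string_Lower + string[i] #Add to the Lower string
--
--     return (string_Upper, string_Lower)
-- ===== SOURCE B (Python) =====
-- def upper_or_lower(string):
--     """Two independent filtered passes instead of one interleaved if/elif loop."""
--     upper = "".join(c for c in string if c.isupper())
--     lower = "".join(c for c in string if c.islower())
--     return (upper, lower)
-- ===== Notes on version B (the rewrite author's own statement) =====
-- stated objective: idiomatic
-- what changed: Replaced the single index-based loop with if/elif string concatenation by two independent filtered comprehensions joined once, one pass per case.
import Mathlib
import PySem

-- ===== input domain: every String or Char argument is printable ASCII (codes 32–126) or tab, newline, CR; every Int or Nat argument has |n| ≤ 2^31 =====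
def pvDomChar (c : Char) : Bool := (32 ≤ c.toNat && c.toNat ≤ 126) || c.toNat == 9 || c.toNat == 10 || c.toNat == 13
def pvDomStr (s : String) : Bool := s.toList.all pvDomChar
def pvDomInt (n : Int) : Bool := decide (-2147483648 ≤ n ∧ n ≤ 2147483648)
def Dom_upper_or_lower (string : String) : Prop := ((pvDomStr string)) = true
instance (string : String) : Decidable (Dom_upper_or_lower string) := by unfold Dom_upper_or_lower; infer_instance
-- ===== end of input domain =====

-- B replaces A's single interleaved index loop by two independent filtered passes (idiomatic; return value only).

-- ===== PORT A =====
-- A: indices i in range(len(string)); if s[i].isupper() append to upper, elif s[i].islower() append to lower.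
def upper_or_lower (string : String) : String × String :=
  let cs := string.toList
  let st := (PySem.List.pyRange 0 (PySem.Chars.len cs) 1).foldl
    (fun (acc : List Char × List Char) i =>
      let c := PySem.List.pyGetD cs i ' '
      if PySem.Chars.isupper c then (acc.1 ++ [c], acc.2)
      else if PySem.Chars.islower c then (acc.1, acc.2 ++ [c])
      else acc) ([], [])
  (String.mk st.1, String.mk st.2)

-- ===== PORT B =====
-- B: two filtered passes, each joined once.
def upper_or_lower_alt (string : String) : String × String :=
  (String.mk (string.toList.filter PySem.Chars.isupper),
   String.mk (string.toList.filter PySem.Chars.islower))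

-- ===== PRECONDITION & SPEC =====
def Spec_upper_or_lower (string : String) (out : String × String) : Prop := out = upper_or_lower_alt string
instance (string : String) (out : String × String) : Decidable (Spec_upper_or_lower string out) := by unfold Spec_upper_or_lower; infer_instance

-- ===== CLAIM (what is proved, stated in full; the proofs are below) =====
def Claim_equal_upper_or_lower : Prop := ∀ (string : String), Dom_upper_or_lower string → Spec_upper_or_lower string (upper_or_lower string)

-- ===== LEMMAS AND PROOFS =====

-- In PySem's ASCII semantics isupper and islower are mutually exclusive for every char.
theorem pv_isupper_not_islower (c : Char) (h : PySem.Chars.isupper c = true) :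
    PySem.Chars.islower c = false := by
  simp [PySem.Chars.isupper] at h
  simp [PySem.Chars.islower]
  intro hc
  exact absurd (le_trans hc h.2) (by decide)

theorem pv_fold_eq_filters (cs : List Char) : ∀ (u l : List Char),
    cs.foldl (fun (acc : List Char × List Char) c =>
      if PySem.Chars.isupper c then (acc.1 ++ [c], acc.2)
      else if PySem.Chars.islower c then (acc.1, acc.2 ++ [c])
      else acc) (u, l)
    = (u ++ cs.filter PySem.Chars.isupper, l ++ cs.filter PySem.Chars.islower) := by
  induction cs with
  | nil => simp
  | cons c cs ih =>
    intro u l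
    by_cases hu : PySem.Chars.isupper c = true
    · simp [List.foldl_cons, hu, pv_isupper_not_islower c hu, ih]
    · by_cases hl : PySem.Chars.islower c = true
      · simp [List.foldl_cons, hu, hl, ih]
      · simp [List.foldl_cons, hu, hl, ih]

-- ===== VERDICT (by name: the statement is the Claim_ definition above) =====
theorem upper_or_lower_spec : Claim_equal_upper_or_lower := by
  intro s _
  show upper_or_lower s = upper_or_lower_alt s
  unfold upper_or_lower upper_or_lower_alt
  simp only [PySem.Chars.len]
  rw [PySem.List.foldl_pyRange_zero_pyGetD' s.toList ' '
    (fun (acc : List Char × List Char) c =>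
      if PySem.Chars.isupper c then (acc.1 ++ [c], acc.2)
      else if PySem.Chars.islower c then (acc.1, acc.2 ++ [c])
      else acc) ([], []), pv_fold_eq_filters]
  simp
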